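-- pv_equiv track=rewrite | github.com/nesco/DPS | helpers.py | coordinate_shift
-- ===== SOURCE A (Python) =====
-- from typing import Any, List, Union, Optional, Iterator, Callable, Tuple, Set, Dict, Literal
--
-- Coord = Tuple[int, int] # Coordinates NOTE: [row][col] --> (col, row)
--
-- def coordinate_shift(transformation_ls: List[Tuple[Coord, Coord]]) -> Optional[Coord]:
--     "Given a list of coordinate changes, find if there is a unique shift"
--     shifts = set()
--     for (col1, row1), (col2, row2) in transformation_ls:
--         shifts.add((col2-col1, row2-row1))
--     if len(shifts) == 1:
--         return shifts.pop()
--     else: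
--         return None
-- ===== SOURCE B (Python) =====
-- def coordinate_shift(transformation_ls):
--     if not transformation_ls:
--         return None
--     (c1, r1), (c2, r2) = transformation_ls[0]
--     cand = (c2 - c1, r2 - r1)
--     for (col1, row1), (col2, row2) in transformation_ls[1:]:
--         if (col2 - col1, row2 - row1) != cand:
--             return None
--     return cand
-- ===== Notes on version B (the rewrite author's own statement) =====
-- stated objective: alternative
-- what changed: B keeps a single candidate shift from the first pair and early-returns None at the first mismatch, instead of accumulating all shifts into a set and testing its size.
import Mathlib
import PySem

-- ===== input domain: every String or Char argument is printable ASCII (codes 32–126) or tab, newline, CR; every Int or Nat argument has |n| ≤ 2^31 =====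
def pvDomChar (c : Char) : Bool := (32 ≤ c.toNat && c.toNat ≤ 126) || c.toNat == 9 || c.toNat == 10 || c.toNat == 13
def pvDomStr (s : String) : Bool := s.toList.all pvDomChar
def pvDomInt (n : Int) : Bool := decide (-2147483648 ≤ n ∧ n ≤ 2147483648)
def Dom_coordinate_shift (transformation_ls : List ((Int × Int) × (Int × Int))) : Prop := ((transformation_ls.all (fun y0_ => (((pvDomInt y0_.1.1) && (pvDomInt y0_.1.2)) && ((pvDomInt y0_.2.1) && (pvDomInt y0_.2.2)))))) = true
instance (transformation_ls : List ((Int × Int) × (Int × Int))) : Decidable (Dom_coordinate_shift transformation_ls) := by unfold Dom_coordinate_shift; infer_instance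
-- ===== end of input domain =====

-- B keeps a single candidate shift and early-returns None at the first mismatch, instead of building a set of all shifts and testing its size (objective: alternative).


-- ===== PORT A =====
-- the per-pair shift (col2-col1, row2-row1)
def pvShift (p : (Int × Int) × (Int × Int)) : Int × Int := (p.2.1 - p.1.1, p.2.2 - p.1.2)

def coordinate_shift (transformation_ls : List ((Int × Int) × (Int × Int))) : Option (Int × Int) :=
  let shifts : PySem.Set (Int × Int) :=
    transformation_ls.foldl (fun s p => PySem.Set.add s (pvShift p)) PySem.Set.empty
  -- len(shifts) == 1 → shifts.pop() (the sole element); else None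
  match shifts with
  | [x] => some x
  | _ => none

-- ===== PORT B =====
def csGo (cand : Int × Int) : List ((Int × Int) × (Int × Int)) → Option (Int × Int)
  | [] => some cand
  | p :: rest => if pvShift p ≠ cand then none else csGo cand rest

def coordinate_shift_alt (transformation_ls : List ((Int × Int) × (Int × Int))) : Option (Int × Int) :=
  match transformation_ls with
  | [] => none
  | p :: rest => csGo (pvShift p) rest

-- ===== PRECONDITION & SPEC =====
def Spec_coordinate_shift (transformation_ls : List ((Int × Int) × (Int × Int))) (out : Option (Int × Int)) : Prop := out = coordinate_shift_alt transformation_ls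
instance (transformation_ls : List ((Int × Int) × (Int × Int))) (out : Option (Int × Int)) : Decidable (Spec_coordinate_shift transformation_ls out) := by unfold Spec_coordinate_shift; infer_instance

-- ===== CLAIM (what is proved, stated in full; the proofs are below) =====
def Claim_equal_coordinate_shift : Prop := ∀ (transformation_ls : List ((Int × Int) × (Int × Int))), Dom_coordinate_shift transformation_ls → Spec_coordinate_shift transformation_ls (coordinate_shift transformation_ls)

-- ===== LEMMAS AND PROOFS =====

-- folding add over pairs whose shifts are already in s leaves s unchanged
theorem foldl_add_of_mem (rest : List ((Int × Int) × (Int × Int))) (s : PySem.Set (Int × Int))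
    (h : ∀ q ∈ rest, pvShift q ∈ s) :
    rest.foldl (fun s p => PySem.Set.add s (pvShift p)) s = s := by
  induction rest with
  | nil => rfl
  | cons q rest ih =>
    have hq : pvShift q ∈ s := h q (by simp)
    have : PySem.Set.add s (pvShift q) = s := by
      simp [PySem.Set.add, PySem.Set.contains]
      exact hq
    simp [List.foldl, this]
    exact ih (fun r hr => h r (by simp [hr]))

-- membership in s is preserved by folding add, and every shift of rest is in the result
theorem mem_foldl_add (rest : List ((Int × Int) × (Int × Int))) (s : PySem.Set (Int × Int))
    (x : Int × Int) (hx : x ∈ s ∨ ∃ q ∈ rest, x = pvShift q) :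
    x ∈ rest.foldl (fun s p => PySem.Set.add s (pvShift p)) s := by
  induction rest generalizing s with
  | nil => simpa using hx
  | cons q rest ih =>
    simp [List.foldl]
    apply ih
    rcases hx with hx | ⟨r, hr, hxr⟩
    · left; simp [PySem.Set.add]; split <;> simp [hx]
    · rcases (by simpa using hr : r = q ∨ r ∈ rest) with rfl | hr'
      · left; subst hxr; simp [PySem.Set.add, PySem.Set.contains]
        split <;> simp_all
      · right; exact ⟨r, hr', hxr⟩

theorem csGo_all (cand : Int × Int) (rest : List ((Int × Int) × (Int × Int)))
    (h : ∀ q ∈ rest, pvShift q = cand) : csGo cand rest = some cand := by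
  induction rest with
  | nil => rfl
  | cons q rest ih =>
    simp [csGo, h q (by simp)]
    exact ih (fun r hr => h r (by simp [hr]))

theorem csGo_bad (cand : Int × Int) (rest : List ((Int × Int) × (Int × Int)))
    (h : ∃ q ∈ rest, pvShift q ≠ cand) : csGo cand rest = none := by
  induction rest with
  | nil => simp at h
  | cons q rest ih =>
    by_cases hq : pvShift q = cand
    · simp [csGo, hq]
      apply ih
      rcases h with ⟨r, hr, hne⟩
      rcases (by simpa using hr : r = q ∨ r ∈ rest) with rfl | hr'
      · exact absurd hq hne
      · exact ⟨r, hr', hne⟩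
    · simp [csGo, hq]

-- ===== VERDICT (by name: the statement is the Claim_ definition above) =====
theorem coordinate_shift_spec : Claim_equal_coordinate_shift := by
  intro ls _
  unfold Spec_coordinate_shift
  match ls with
  | [] => rfl
  | p :: rest =>
    by_cases hall : ∀ q ∈ rest, pvShift q = pvShift p
    · have hfold : rest.foldl (fun s q => PySem.Set.add s (pvShift q)) [pvShift p] = [pvShift p] :=
        foldl_add_of_mem rest [pvShift p] (by intro q hq; simp [hall q hq])
      simp [coordinate_shift, coordinate_shift_alt, List.foldl, hfold, csGo_all _ _ hall]
    · push Not at hall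
      rcases hall with ⟨q, hq, hne⟩
      have hmem1 : pvShift p ∈ rest.foldl (fun s q => PySem.Set.add s (pvShift q)) [pvShift p] :=
        mem_foldl_add rest _ _ (Or.inl (by simp))
      have hmem2 : pvShift q ∈ rest.foldl (fun s q => PySem.Set.add s (pvShift q)) [pvShift p] :=
        mem_foldl_add rest _ _ (Or.inr ⟨q, hq, rfl⟩)
      have hns : ∀ x, rest.foldl (fun s q => PySem.Set.add s (pvShift q)) [pvShift p] ≠ [x] := by
        intro x hx
        rw [hx] at hmem1 hmem2
        simp_all
      have hb : coordinate_shift_alt (p :: rest) = none := by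
        simp [coordinate_shift_alt, csGo_bad _ _ ⟨q, hq, hne⟩]
      rw [hb]
      simp only [coordinate_shift, List.foldl]
      split
      · next x hx => exact absurd hx (hns x)
      · rfl
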